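-- pv_equiv track=rewrite | github.com/hldai/aspectex | applyrules.py | __match_terms
-- ===== SOURCE A (Python) =====
-- def __match_terms(sent_text: str, terms_vocab):
--     terms = list()
--     for t in terms_vocab:
--         pbeg = sent_text.find(t)
--         if pbeg < 0:
--             continue
--         pend = pbeg + len(t)
--         if pbeg > 0 and sent_text[pbeg - 1].isalpha():
--             continue
--         if pend < len(sent_text) and sent_text[pend].isalpha():
--             continue
--         terms.append(t)
--     return terms
-- ===== SOURCE B (Python) =====
-- def __match_terms(sent_text: str, terms_vocab):
--     # Transposed algorithm: scan sentence positions once with a shrinking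
--     # worklist of distinct terms, recording each term's first occurrence,
--     # then filter the vocab by a word-boundary check at that occurrence.
--     n = len(sent_text)
--     first = {}
--     pending = list(dict.fromkeys(terms_vocab))
--     for i in range(n + 1):
--         if not pending:
--             break
--         still = []
--         for t in pending:
--             if sent_text.startswith(t, i):
--                 first[t] = i
--             else:
--                 still.append(t)
--         pending = still
--     res = []
--     for t in terms_vocab:
--         i = first.get(t)
--         if i is None:
--             continue
--         j = i + len(t)
--         if (i == 0 or not sent_text[i - 1].isalpha()) and (j == n or not sent_text[j].isalpha()):
--             res.append(t)
--     return res
-- ===== Notes on version B (the rewrite author's own statement) =====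
-- stated objective: alternative
-- what changed: Replaces the per-term substring search (one str.find per vocab term) by a transposed single scan over sentence positions with a shrinking worklist of distinct terms that records each term's first occurrence in a dict, followed by one boundary-checking filter pass over the vocab.
import Mathlib
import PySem

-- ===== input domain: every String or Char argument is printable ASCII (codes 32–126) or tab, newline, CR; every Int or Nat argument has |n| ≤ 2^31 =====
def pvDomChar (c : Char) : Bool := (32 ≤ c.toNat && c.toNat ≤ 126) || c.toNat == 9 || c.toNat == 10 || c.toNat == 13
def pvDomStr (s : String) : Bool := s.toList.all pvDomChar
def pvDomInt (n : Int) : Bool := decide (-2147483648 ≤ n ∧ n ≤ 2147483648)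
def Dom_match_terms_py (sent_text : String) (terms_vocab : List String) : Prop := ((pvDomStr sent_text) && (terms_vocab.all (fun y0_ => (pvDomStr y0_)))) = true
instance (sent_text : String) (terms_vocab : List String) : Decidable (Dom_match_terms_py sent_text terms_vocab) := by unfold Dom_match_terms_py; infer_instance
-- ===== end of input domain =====

-- B replaces A's per-term str.find scan by a single transposed scan over sentence
-- positions with a shrinking worklist recording first occurrences (objective: alternative).

-- ===== PORT A =====
-- Literal transliteration of A: for each vocab term, s.find(t), then the two
-- boundary checks at the found position (sent_text[k].isalpha() on a single
-- character is exactly PySem.Chars.isalpha of that character on the ASCII domain;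
-- both indices are guarded in range, so pyGetD is exact).
def match_terms_py (sent_text : String) (terms_vocab : List String) : List String :=
  terms_vocab.foldl (fun terms t =>
    let pbeg := PySem.Str.find sent_text t
    if pbeg < 0 then terms
    else
      let pend := pbeg + PySem.Str.len t
      if pbeg > 0 && PySem.Chars.isalpha (PySem.List.pyGetD sent_text.toList (pbeg - 1) ' ') then terms
      else if pend < PySem.Str.len sent_text && PySem.Chars.isalpha (PySem.List.pyGetD sent_text.toList pend ' ') then terms
      else terms ++ [t]) []

-- ===== PORT B =====
-- B-side helper: the inner worklist pass at position i (Source B's `for t in pending`).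
-- `sent_text.startswith(t, i)` is exactly `startswith` on the slice s[i:] (0 ≤ i here).
def pvInnerB (s : List Char) (st : PySem.Dict String Int × List String) (i : Int) :
    PySem.Dict String Int × List String :=
  st.2.foldl (fun acc t =>
    if PySem.Chars.startswith (PySem.List.slice s (some i) none) t.toList
    then (acc.1.insert t i, acc.2) else (acc.1, acc.2 ++ [t])) (st.1, [])

-- Literal transliteration of Source B: scan i in range(n+1) keeping (first, pending),
-- then the boundary-checking filter pass over terms_vocab.  Source B's `if not pending:
-- break` fires exactly when pending = [], where the loop body is the identity
-- (the fold over an empty worklist returns the state unchanged), so running the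
-- remaining iterations as no-ops is exact.
def match_terms_py_alt (sent_text : String) (terms_vocab : List String) : List String :=
  let n := PySem.Str.len sent_text
  let s := sent_text.toList
  let final := (PySem.List.pyRange 0 (n + 1) 1).foldl (pvInnerB s)
      ((PySem.Dict.empty : PySem.Dict String Int), PySem.List.dedup terms_vocab)
  terms_vocab.foldl (fun res t =>
    match final.1.get? t with
    | none => res
    | some i =>
      let j := i + PySem.Str.len t
      if (i == 0 || !PySem.Chars.isalpha (PySem.List.pyGetD s (i - 1) ' ')) &&
         (j == n || !PySem.Chars.isalpha (PySem.List.pyGetD s j ' '))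
      then res ++ [t] else res) []

-- ===== PRECONDITION & SPEC =====
def Spec_match_terms_py (sent_text : String) (terms_vocab : List String) (out : List String) : Prop := out = match_terms_py_alt sent_text terms_vocab
instance (sent_text : String) (terms_vocab : List String) (out : List String) : Decidable (Spec_match_terms_py sent_text terms_vocab out) := by unfold Spec_match_terms_py; infer_instance

-- ===== CLAIM (what is proved, stated in full; the proofs are below) =====
def Claim_equal_match_terms_py : Prop := ∀ (sent_text : String) (terms_vocab : List String), Dom_match_terms_py sent_text terms_vocab → Spec_match_terms_py sent_text terms_vocab (match_terms_py sent_text terms_vocab)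

-- ===== LEMMAS AND PROOFS =====

-- A's keep-decision as a predicate
def pvKeepA (s : List Char) (t : String) : Bool :=
  let pbeg := PySem.Chars.find s t.toList
  if pbeg < 0 then false
  else
    let pend := pbeg + (t.toList.length : Int)
    if pbeg > 0 && PySem.Chars.isalpha (PySem.List.pyGetD s (pbeg - 1) ' ') then false
    else if pend < (s.length : Int) && PySem.Chars.isalpha (PySem.List.pyGetD s pend ' ') then false
    else true

-- B's keep-decision, given the first-occurrence dict
def pvKeepB (s : List Char) (first : PySem.Dict String Int) (t : String) : Bool :=
  match first.get? t with
  | none => false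
  | some i =>
    let j := i + (t.toList.length : Int)
    (i == 0 || !PySem.Chars.isalpha (PySem.List.pyGetD s (i - 1) ' ')) &&
    (j == (s.length : Int) || !PySem.Chars.isalpha (PySem.List.pyGetD s j ' '))

-- which terms are still pending before position k
def pvPend (s : List Char) (k : Nat) (t : String) : Bool :=
  decide (PySem.Chars.find s t.toList < 0) || decide ((k : Int) ≤ PySem.Chars.find s t.toList)

-- the loop invariant of B's outer scan
def pvInv (s : List Char) (V : List String) (k : Nat)
    (st : PySem.Dict String Int × List String) : Prop :=
  st.2 = (PySem.List.dedup V).filter (pvPend s k) ∧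
  ∀ t : String, st.1.get? t =
    if t ∈ PySem.List.dedup V ∧ 0 ≤ PySem.Chars.find s t.toList ∧ PySem.Chars.find s t.toList < (k : Int)
    then some (PySem.Chars.find s t.toList) else none

-- the inner fold's step, named for the proofs (definitionally the lambda in pvInnerB)
def pvStepB (s : List Char) (i : Int) (acc : PySem.Dict String Int × List String) (t : String) :
    PySem.Dict String Int × List String :=
  if PySem.Chars.startswith (PySem.List.slice s (some i) none) t.toList
  then (acc.1.insert t i, acc.2) else (acc.1, acc.2 ++ [t])

theorem pvInnerB_eq (s : List Char) (st : PySem.Dict String Int × List String) (i : Int) :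
    pvInnerB s st i = st.2.foldl (pvStepB s i) (st.1, []) := rfl

theorem pvStep_snd (s : List Char) (i : Int) (pending : List String)
    (d : PySem.Dict String Int) (acc : List String) :
    (pending.foldl (pvStepB s i) (d, acc)).2 =
      acc ++ pending.filter (fun t => !PySem.Chars.startswith (PySem.List.slice s (some i) none) t.toList) := by
  induction pending generalizing d acc with
  | nil => simp
  | cons t rest ih =>
    simp only [List.foldl_cons, pvStepB]
    by_cases h : PySem.Chars.startswith (PySem.List.slice s (some i) none) t.toList = true
    · simp [h, ih]
    · simp only [Bool.not_eq_true] at h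
      simp [h, ih]

theorem pvStep_get (s : List Char) (i : Int) (pending : List String)
    (d : PySem.Dict String Int) (acc : List String) (t' : String) :
    (pending.foldl (pvStepB s i) (d, acc)).1.get? t' =
      if t' ∈ pending ∧ PySem.Chars.startswith (PySem.List.slice s (some i) none) t'.toList = true
      then some i else d.get? t' := by
  induction pending generalizing d acc with
  | nil => simp
  | cons t rest ih =>
    simp only [List.foldl_cons, pvStepB]
    by_cases h : PySem.Chars.startswith (PySem.List.slice s (some i) none) t.toList = true
    · simp only [h, if_pos]
      rw [ih]
      by_cases hm : t' ∈ rest ∧ PySem.Chars.startswith (PySem.List.slice s (some i) none) t'.toList = true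
      · rw [if_pos hm, if_pos ⟨List.mem_cons_of_mem _ hm.1, hm.2⟩]
      · rw [if_neg hm]
        by_cases he : t' = t
        · subst he
          rw [PySem.Dict.get?_insert_self, if_pos ⟨List.mem_cons_self, h⟩]
        · rw [PySem.Dict.get?_insert_of_ne _ _ he]
          by_cases hc : t' ∈ t :: rest ∧ PySem.Chars.startswith (PySem.List.slice s (some i) none) t'.toList = true
          · exact absurd ⟨(List.mem_cons.mp hc.1).resolve_left he, hc.2⟩ hm
          · rw [if_neg hc]
    · simp only [h, if_neg, Bool.false_eq_true, not_false_iff]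
      rw [ih]
      congr 1
      by_cases he : t' = t
      · subst he
        simp [h]
      · simp [List.mem_cons, he]

-- at a position still pending, the worklist test fires exactly at the first occurrence
theorem pvSw_iff (s : List Char) (k : Nat) (t : String) (hp : pvPend s k t = true) :
    (PySem.Chars.startswith (List.drop k s) t.toList = true) ↔
      PySem.Chars.find s t.toList = (k : Int) := by
  rw [PySem.Chars.startswith_iff]
  simp only [pvPend, Bool.or_eq_true, decide_eq_true_eq] at hp
  constructor
  · intro hpre
    have hin : PySem.Chars.isIn t.toList s = true :=
      (PySem.Chars.exists_prefix_drop_iff_isIn t.toList s).mp ⟨k, hpre⟩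
    have hnn : 0 ≤ PySem.Chars.find s t.toList :=
      (PySem.Chars.find_nonneg_iff s t.toList).mpr ((PySem.Chars.isIn_iff_infix _ _).mp hin)
    obtain ⟨-, hmin⟩ := PySem.Chars.find_spec hnn
    have hle : (PySem.Chars.find s t.toList).toNat ≤ k := by
      by_contra hlt
      exact hmin k (by omega) hpre
    have := Int.toNat_of_nonneg hnn
    rcases hp with hp | hp
    · omega
    · omega
  · intro hf
    have hnn : 0 ≤ PySem.Chars.find s t.toList := by omega
    have hpre := (PySem.Chars.find_spec hnn).1
    rwa [hf] at hpre
    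
theorem pvInv_step (s : List Char) (V : List String) (k : Nat) (st : PySem.Dict String Int × List String)
    (_hk : k ≤ s.length) (h : pvInv s V k st) : pvInv s V (k + 1) (pvInnerB s st (k : Int)) := by
  obtain ⟨hpend, hget⟩ := h
  have hslice : PySem.List.slice s (some (k : Int)) none = List.drop k s := by
    rw [PySem.List.slice_from s (by omega : (0:Int) ≤ k)]
    simp
  constructor
  · rw [pvInnerB_eq, pvStep_snd, hpend, List.nil_append, List.filter_filter]
    apply List.filter_congr
    intro t _
    rw [hslice]
    set f := PySem.Chars.find s t.toList with hfdef
    have hP : forall (m : Nat), pvPend s m t = true ↔ (f < 0 ∨ (m : Int) ≤ f) := by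
      intro m
      simp [pvPend, hfdef]
    rw [Bool.eq_iff_iff]
    simp only [Bool.and_eq_true, hP]
    push_cast
    by_cases hp : pvPend s k t = true
    · by_cases hf : f = (k : Int)
      · have hswt := (pvSw_iff s k t hp).mpr hf
        constructor
        · rintro ⟨hswf, -⟩
          rw [hswt] at hswf
          cases hswf
        · intro hx
          exfalso
          omega
      · have hswf : PySem.Chars.startswith (List.drop k s) t.toList = false := by
          rcases Bool.eq_false_or_eq_true (PySem.Chars.startswith (List.drop k s) t.toList) with hB | hB
          · exact absurd ((pvSw_iff s k t hp).mp hB) hf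
          · exact hB
        rw [hP] at hp
        constructor
        · intro _
          omega
        · intro _
          exact ⟨by simp [hswf], by omega⟩
    · rw [hP] at hp
      constructor
      · rintro ⟨-, hx⟩
        omega
      · intro hx
        exfalso
        omega
  · intro t
    rw [pvInnerB_eq, pvStep_get, hpend]
    set f := PySem.Chars.find s t.toList with hfdef
    by_cases hc : t ∈ (PySem.List.dedup V).filter (pvPend s k) ∧
        PySem.Chars.startswith (PySem.List.slice s (some (k:Int)) none) t.toList = true
    · obtain ⟨hm, hsw⟩ := hc
      rw [List.mem_filter] at hm
      rw [hslice] at hsw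
      have hf : f = (k : Int) := (pvSw_iff s k t hm.2).mp hsw
      rw [if_pos ⟨List.mem_filter.mpr hm, by rwa [hslice]⟩, if_pos ⟨hm.1, by omega, by push_cast; omega⟩, hf]
    · rw [if_neg hc, hget t]
      by_cases hd : t ∈ PySem.List.dedup V ∧ 0 ≤ f ∧ f < (k : Int)
      · rw [if_pos hd, if_pos ⟨hd.1, hd.2.1, by have := hd.2.2; push_cast; omega⟩]
      · rw [if_neg hd]
        by_cases hd' : t ∈ PySem.List.dedup V ∧ 0 ≤ f ∧ f < ((k + 1 : Nat) : Int)
        · exfalso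
          have hf : f = (k : Int) := by
            obtain ⟨hmem, h1, h2⟩ := hd'
            have h3 : ¬ (0 ≤ f ∧ f < (k : Int)) := fun hh => hd ⟨hmem, hh.1, hh.2⟩
            push_cast at h2
            omega
          apply hc
          refine ⟨List.mem_filter.mpr ⟨hd'.1, ?_⟩, ?_⟩
          · simp only [pvPend, Bool.or_eq_true, decide_eq_true_eq]
            right; omega
          · rw [hslice]
            apply (pvSw_iff s k t ?_).mpr hf
            simp only [pvPend, Bool.or_eq_true, decide_eq_true_eq]
            right; omega
        · rw [if_neg hd']

theorem pvInv_final (s : List Char) (V : List String) :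
    pvInv s V (s.length + 1)
      ((PySem.List.pyRange 0 ((s.length : Int) + 1) 1).foldl (pvInnerB s)
        ((PySem.Dict.empty : PySem.Dict String Int), PySem.List.dedup V)) := by
  have hcast : ((s.length : Int) + 1) = ((s.length + 1 : Nat) : Int) := by push_cast; ring
  rw [hcast, PySem.List.pyRange_zero_natCast]
  have main : forall (m : Nat), m ≤ s.length + 1 →
      pvInv s V m (((List.range m).map (fun (k : Nat) => (k : Int))).foldl (pvInnerB s)
        ((PySem.Dict.empty : PySem.Dict String Int), PySem.List.dedup V)) := by
    intro m
    induction m with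
    | zero =>
      intro _
      constructor
      · simp only [List.range_zero, List.map_nil, List.foldl_nil]
        symm
        apply List.filter_eq_self.mpr
        intro t _
        simp only [pvPend, Bool.or_eq_true, decide_eq_true_eq]
        omega
      · intro t
        simp only [List.range_zero, List.map_nil, List.foldl_nil, PySem.Dict.get?_empty]
        rw [if_neg (by rintro ⟨-, h1, h2⟩; push_cast at h2; omega)]
    | succ m ih =>
      intro hm
      simp only [List.range_succ, List.map_append, List.map_cons, List.map_nil, List.foldl_append]
      simpa using pvInv_step s V m _ (by omega) (ih (by omega))
  exact main (s.length + 1) le_rfl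

theorem pvA_filter (sent_text : String) (V : List String) :
    match_terms_py sent_text V = V.filter (pvKeepA sent_text.toList) := by
  unfold match_terms_py
  have hstep : (fun (terms : List String) (t : String) =>
      let pbeg := PySem.Str.find sent_text t
      if pbeg < 0 then terms
      else
        let pend := pbeg + PySem.Str.len t
        if pbeg > 0 && PySem.Chars.isalpha (PySem.List.pyGetD sent_text.toList (pbeg - 1) ' ') then terms
        else if pend < PySem.Str.len sent_text && PySem.Chars.isalpha (PySem.List.pyGetD sent_text.toList pend ' ') then terms
        else terms ++ [t]) =
      fun terms t => if pvKeepA sent_text.toList t then terms ++ [t] else terms := by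
    funext terms t
    simp only [pvKeepA, PySem.Str.find_eq, PySem.Str.len_eq]
    split_ifs <;> simp_all
  rw [hstep]
  simpa using PySem.List.foldl_append_if (pvKeepA sent_text.toList) (fun t => t) V []

theorem pvB_filter (sent_text : String) (V : List String) :
    match_terms_py_alt sent_text V =
      V.filter (pvKeepB sent_text.toList
        ((PySem.List.pyRange 0 ((sent_text.toList.length : Int) + 1) 1).foldl (pvInnerB sent_text.toList)
          ((PySem.Dict.empty : PySem.Dict String Int), PySem.List.dedup V)).1) := by
  unfold match_terms_py_alt
  simp only [PySem.Str.len_eq]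
  set first := ((PySem.List.pyRange 0 ((sent_text.toList.length : Int) + 1) 1).foldl (pvInnerB sent_text.toList)
      ((PySem.Dict.empty : PySem.Dict String Int), PySem.List.dedup V)).1 with hfirst
  rw [PySem.List.foldl_congr_mem V _
      (fun res t => if pvKeepB sent_text.toList first t then res ++ [t] else res) []
      (by
        intro res t _
        rcases hg : first.get? t with _ | i
        · simp [pvKeepB, hg]
        · simp [pvKeepB, hg, PySem.Str.len_eq])]
  simpa using PySem.List.foldl_append_if (pvKeepB sent_text.toList first) (fun t => t) V []

-- the two boundary checks agree at the first occurrence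
theorem pvKeep_eq (s : List Char) (t : String) (f : Int)
    (hf : PySem.Chars.find s t.toList = f) (h0 : 0 ≤ f)
    (hj : f + (t.toList.length : Int) ≤ (s.length : Int)) :
    pvKeepA s t =
      ((f == 0 || !PySem.Chars.isalpha (PySem.List.pyGetD s (f - 1) ' ')) &&
       (f + (t.toList.length : Int) == (s.length : Int) ||
        !PySem.Chars.isalpha (PySem.List.pyGetD s (f + (t.toList.length : Int)) ' '))) := by
  unfold pvKeepA
  rw [hf, if_neg (by omega)]
  by_cases hA : (0 : Int) < f
  · have h1 : (f == 0) = false := by simp only [beq_eq_false_iff_ne, ne_eq]; omega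
    have h2 : decide (f > 0) = true := by simp only [decide_eq_true_eq]; omega
    by_cases hB : f + (t.toList.length : Int) < (s.length : Int)
    · have h3 : (f + (t.toList.length : Int) == (s.length : Int)) = false := by simp only [beq_eq_false_iff_ne, ne_eq]; omega
      have h4 : decide (f + (t.toList.length : Int) < (s.length : Int)) = true := by simp only [decide_eq_true_eq]; omega
      simp only [h1, h2, h3, h4, Bool.true_and, Bool.false_or]
      cases hA' : PySem.Chars.isalpha (PySem.List.pyGetD s (f - 1) ' ') <;>
        cases hB' : PySem.Chars.isalpha (PySem.List.pyGetD s (f + (t.toList.length : Int)) ' ') <;> simp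
    · have h3 : (f + (t.toList.length : Int) == (s.length : Int)) = true := by simp only [beq_iff_eq]; omega
      have h4 : decide (f + (t.toList.length : Int) < (s.length : Int)) = false := by simp only [decide_eq_false_iff_not]; omega
      simp only [h1, h2, h3, h4, Bool.true_and, Bool.false_and, Bool.false_or, Bool.true_or, Bool.and_true]
      cases hA' : PySem.Chars.isalpha (PySem.List.pyGetD s (f - 1) ' ') <;> simp
  · have hf0 : f = 0 := by omega
    have h1 : (f == 0) = true := by simp only [beq_iff_eq]; omega
    have h2 : decide (f > 0) = false := by simp only [decide_eq_false_iff_not]; omega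
    simp only [h1, h2, Bool.false_and, Bool.true_or, Bool.true_and]
    by_cases hB : f + (t.toList.length : Int) < (s.length : Int)
    · have h3 : (f + (t.toList.length : Int) == (s.length : Int)) = false := by simp only [beq_eq_false_iff_ne, ne_eq]; omega
      have h4 : decide (f + (t.toList.length : Int) < (s.length : Int)) = true := by simp only [decide_eq_true_eq]; omega
      simp only [h3, h4, Bool.true_and, Bool.false_or]
      cases hB' : PySem.Chars.isalpha (PySem.List.pyGetD s (f + (t.toList.length : Int)) ' ') <;> simp
    · have h3 : (f + (t.toList.length : Int) == (s.length : Int)) = true := by simp only [beq_iff_eq]; omega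
      have h4 : decide (f + (t.toList.length : Int) < (s.length : Int)) = false := by simp only [decide_eq_false_iff_not]; omega
      rw [h3, h4]
      simp

-- ===== VERDICT (by name: the statement is the Claim_ definition above) =====
theorem match_terms_py_spec : Claim_equal_match_terms_py := by
  intro sent_text V _
  unfold Spec_match_terms_py
  rw [pvA_filter, pvB_filter]
  apply List.filter_congr
  intro t ht
  obtain ⟨-, hget⟩ := pvInv_final sent_text.toList V
  have hg := hget t
  by_cases h0 : 0 ≤ PySem.Chars.find sent_text.toList t.toList
  · have hlt : PySem.Chars.find sent_text.toList t.toList < ((sent_text.toList.length + 1 : Nat) : Int) := by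
      have := PySem.Chars.find_le_length sent_text.toList t.toList
      push_cast
      omega
    rw [if_pos ⟨(PySem.List.mem_dedup V t).mpr ht, h0, hlt⟩] at hg
    have hj : PySem.Chars.find sent_text.toList t.toList + (t.toList.length : Int) ≤ (sent_text.toList.length : Int) := by
      have hpre := (PySem.Chars.find_spec h0).1
      have hlen := hpre.length_le
      rw [List.length_drop] at hlen
      have := Int.toNat_of_nonneg h0
      have := PySem.Chars.find_le_length sent_text.toList t.toList
      omega
    rw [pvKeep_eq sent_text.toList t _ rfl h0 hj]
    simp only [pvKeepB, hg]
  · rw [if_neg (fun hc => h0 hc.2.1)] at hg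
    simp only [pvKeepB, hg, pvKeepA]
    rw [if_pos (by omega)]
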